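-- pv_equiv track=rewrite | github.com/ericraymond/PySwitch | content/inputs.py | _trim_str_vowels_first_rightmost
-- ===== SOURCE A (Python) =====
-- _MAX_LENGTH = 5
--
-- def _trim_str_vowels_first_rightmost(s: str):
--     # Removes characters from the right of a string until it reaches _MAX_LENGTH.
--     # Prioritizes removing vowels first, then any other character from the right side.
--
--     if len(s) <= _MAX_LENGTH:
--         return s
--
--     vowels = "aeiouAEIOU"
--     temp_list = list(s)
--
--     i = len(temp_list) - 1
--     while i >= 0 and len(temp_list) > _MAX_LENGTH:
--         if temp_list[i] in vowels:
--             temp_list.pop(i)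
--         i -= 1
--
--     while len(temp_list) > _MAX_LENGTH:
--         temp_list.pop()
--
--     return "".join(temp_list)
-- ===== SOURCE B (Python) =====
-- _MAX_LENGTH = 5
--
-- _VOWELS = set("aeiouAEIOU")
--
-- def _trim_str_vowels_first_rightmost(s: str):
--     # Single right-to-left pass: skip up to `need` vowels (rightmost first),
--     # keep the rest, then truncate to _MAX_LENGTH.
--     need = len(s) - _MAX_LENGTH
--     if need <= 0:
--         return s
--     kept = []
--     for ch in reversed(s):
--         if need > 0 and ch in _VOWELS:
--             need -= 1
--         else:
--             kept.append(ch)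
--     kept.reverse()
--     return "".join(kept[:_MAX_LENGTH])
-- ===== Notes on version B (the rewrite author's own statement) =====
-- stated objective: faster
-- what changed: Replaces the index-walking loop with repeated list.pop(i) (each pop shifts the tail) plus a second truncation loop by one linear right-to-left pass that skips up to len(s)-5 rightmost vowels and a single truncation.
import Mathlib
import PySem

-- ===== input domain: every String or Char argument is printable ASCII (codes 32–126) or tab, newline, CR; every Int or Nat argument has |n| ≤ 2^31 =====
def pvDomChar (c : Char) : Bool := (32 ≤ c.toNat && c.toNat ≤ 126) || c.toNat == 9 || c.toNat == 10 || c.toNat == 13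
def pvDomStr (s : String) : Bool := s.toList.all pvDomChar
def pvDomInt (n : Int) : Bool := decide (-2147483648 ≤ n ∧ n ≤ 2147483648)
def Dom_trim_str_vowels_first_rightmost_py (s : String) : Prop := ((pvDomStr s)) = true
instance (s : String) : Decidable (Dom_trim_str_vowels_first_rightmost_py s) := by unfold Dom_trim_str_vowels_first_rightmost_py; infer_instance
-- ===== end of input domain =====

-- B replaces A's index-walking loop of repeated list.pop(i) plus a trailing-pop loop
-- by one linear right-to-left pass that skips up to len(s)-5 rightmost vowels, then one truncation.

-- ===== PORT A =====
-- vowels = "aeiouAEIOU"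
def pvVowels : List Char := "aeiouAEIOU".toList

def pvLoopA (tl : List Char) (i : Int) : List Char :=
  if h : 0 ≤ i ∧ tl.length > 5 then
    if ((PySem.List.pyGet? tl i).getD ' ') ∈ pvVowels then
      pvLoopA (((PySem.List.pop? tl i).map Prod.snd).getD tl) (i - 1)
    else
      pvLoopA tl (i - 1)
  else tl
termination_by (i + 1).toNat
decreasing_by all_goals (simp; omega)

def pvLoopA2 (tl : List Char) : List Char :=
  if tl.length > 5 then pvLoopA2 tl.dropLast else tl
termination_by tl.length
decreasing_by simp [List.length_dropLast]; omega


def trim_str_vowels_first_rightmost_py (s : String) : String :=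
  if PySem.Str.len s ≤ 5 then s
  else
    let temp := s.toList
    String.ofList (pvLoopA2 (pvLoopA temp ((temp.length : Int) - 1)))

-- ===== PORT B =====
-- for ch in reversed(s): if need > 0 and ch in _VOWELS: need -= 1 else: kept.append(ch)
def pvBLoop : List Char → Int → List Char → List Char
  | [], _, kept => kept
  | c :: rest, need, kept =>
      if need > 0 ∧ c ∈ pvVowels then pvBLoop rest (need - 1) kept
      else pvBLoop rest need (kept ++ [c])


def trim_str_vowels_first_rightmost_py_alt (s : String) : String :=
  let need : Int := PySem.Str.len s - 5
  if need ≤ 0 then s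
  else
    let kept := pvBLoop s.toList.reverse need []
    String.ofList (kept.reverse.take 5)   -- "".join(kept[:5]) after kept.reverse()

-- ===== PRECONDITION & SPEC =====
def Spec_trim_str_vowels_first_rightmost_py (s : String) (out : String) : Prop := out = trim_str_vowels_first_rightmost_py_alt s
instance (s : String) (out : String) : Decidable (Spec_trim_str_vowels_first_rightmost_py s out) := by unfold Spec_trim_str_vowels_first_rightmost_py; infer_instance

-- ===== CLAIM (what is proved, stated in full; the proofs are below) =====
def Claim_equal_trim_str_vowels_first_rightmost_py : Prop := ∀ (s : String), Dom_trim_str_vowels_first_rightmost_py s → Spec_trim_str_vowels_first_rightmost_py s (trim_str_vowels_first_rightmost_py s)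

-- ===== LEMMAS AND PROOFS =====

-- canonical form of the vowel-removal pass: the list is already reversed, the
-- head is the rightmost character; drop a vowel while n > 0
def pvRcore : List Char → Nat → List Char
  | [], _ => []
  | c :: t, n => if n > 0 ∧ c ∈ pvVowels then pvRcore t (n - 1) else c :: pvRcore t n

theorem pvRcore_zero (l : List Char) : pvRcore l 0 = l := by
  induction l with
  | nil => rfl
  | cons c t ih => simp [pvRcore, ih]

theorem pvBLoop_eq (cs : List Char) : ∀ (n : Nat) (kept : List Char),
    pvBLoop cs (n : Int) kept = kept ++ pvRcore cs n := by
  induction cs with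
  | nil => intro n kept; simp [pvBLoop, pvRcore]
  | cons c t ih =>
    intro n kept
    simp only [pvBLoop, pvRcore]
    split_ifs with h1 h2 h2
    · have e : ((n : Int) - 1) = ((n - 1 : Nat) : Int) := by omega
      rw [e, ih]
    · exact absurd ⟨by exact_mod_cast h1.1, h1.2⟩ h2
    · exact absurd ⟨by exact_mod_cast h2.1, h2.2⟩ h1
    · rw [ih]; simp

theorem pvLoopA2_eq (tl : List Char) : pvLoopA2 tl = tl.take 5 := by
  fun_induction pvLoopA2 tl with
  | case1 tl h ih =>
      rw [ih, List.dropLast_eq_take, List.take_take]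
      congr 1; omega
  | case2 tl h => rw [List.take_of_length_le (by omega)]

theorem pvLoopA_spec (rp : List Char) : ∀ (suf : List Char),
    pvLoopA (rp.reverse ++ suf) ((rp.length : Int) - 1)
      = (pvRcore rp (rp.length + suf.length - 5)).reverse ++ suf := by
  induction rp with
  | nil =>
    intro suf
    rw [pvLoopA]
    simp [pvRcore]
  | cons c rt ih =>
    intro suf
    have e1 : ((c :: rt).length : Int) - 1 = ((rt.length : Nat) : Int) := by simp
    have e2 : (c :: rt).reverse ++ suf = rt.reverse ++ c :: suf := by simp
    rw [e1, e2, pvLoopA]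
    by_cases hl : rt.length + 1 + suf.length > 5
    · have hc : (0 ≤ ((rt.length : Nat) : Int) ∧ (rt.reverse ++ c :: suf).length > 5) := by
        refine ⟨by positivity, ?_⟩
        simp only [List.length_append, List.length_reverse, List.length_cons]; omega
      rw [dif_pos hc]
      have hget : PySem.List.pyGet? (rt.reverse ++ c :: suf) ((rt.length : Nat) : Int) = some c := by
        have := PySem.List.pyGet?_append_length (pre := rt.reverse) (y := c) (ys := suf)
        simp only [List.length_reverse] at this
        exact this
      rw [hget]
      simp only [Option.getD_some, List.length_cons]
      by_cases hv : c ∈ pvVowels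
      · rw [if_pos hv]
        have hpop : PySem.List.pop? (rt.reverse ++ c :: suf) ((rt.length : Nat) : Int)
            = some ((rt.reverse ++ c :: suf)[rt.length]'(by
                simp only [List.length_append, List.length_reverse, List.length_cons]; omega),
              (rt.reverse ++ c :: suf).eraseIdx rt.length) := by
          have := PySem.List.pop?_natCast (xs := rt.reverse ++ c :: suf) rt.length (by
            simp only [List.length_append, List.length_reverse, List.length_cons]; omega)
          simpa using this
        rw [hpop]
        simp only [Option.map_some, Option.getD_some]
        have herase : (rt.reverse ++ c :: suf).eraseIdx rt.length = rt.reverse ++ suf := by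
          rw [show rt.length = rt.reverse.length by simp] at *
          rw [List.eraseIdx_append_of_length_le (le_refl _)]
          simp
        rw [herase, ih suf]
        simp only [pvRcore]
        rw [if_pos ⟨by omega, hv⟩]
        have e4 : rt.length + 1 + suf.length - 5 - 1 = rt.length + suf.length - 5 := by omega
        rw [e4]
      · rw [if_neg hv]
        have := ih (c :: suf)
        simp only [List.length_cons] at this
        rw [this]
        simp only [pvRcore]
        rw [if_neg (by intro h; exact hv h.2)]
        have e5 : rt.length + (suf.length + 1) - 5 = rt.length + 1 + suf.length - 5 := by omega
        rw [e5]
        simp [List.append_assoc]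
    · rw [dif_neg (by
        simp only [List.length_append, List.length_reverse, List.length_cons, not_and]
        intro _; omega)]
      have e6 : (c :: rt).length + suf.length - 5 = 0 := by
        simp only [List.length_cons]; omega
      rw [e6, pvRcore_zero]
      simp

theorem trim_str_vowels_first_rightmost_py_main (s : String) :
    trim_str_vowels_first_rightmost_py s = trim_str_vowels_first_rightmost_py_alt s := by
  unfold trim_str_vowels_first_rightmost_py trim_str_vowels_first_rightmost_py_alt
  rw [PySem.Str.len_eq]
  by_cases h : (s.toList.length : Int) ≤ 5
  · rw [if_pos h, if_pos (by omega)]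
  · rw [if_neg h, if_neg (by omega)]
    show String.ofList (pvLoopA2 (pvLoopA s.toList ((s.toList.length : Int) - 1)))
      = String.ofList ((pvBLoop s.toList.reverse ((s.toList.length : Int) - 5) []).reverse.take 5)
    have hA := pvLoopA_spec s.toList.reverse []
    simp only [List.reverse_reverse, List.append_nil, List.length_reverse,
      List.length_nil, Nat.add_zero] at hA
    rw [hA, pvLoopA2_eq]
    have e : ((s.toList.length : Int) - 5) = ((s.toList.length - 5 : Nat) : Int) := by omega
    rw [e, pvBLoop_eq]
    simp

-- ===== VERDICT (by name: the statement is the Claim_ definition above) =====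
theorem trim_str_vowels_first_rightmost_py_spec : Claim_equal_trim_str_vowels_first_rightmost_py := by
  intro s _
  unfold Spec_trim_str_vowels_first_rightmost_py
  exact trim_str_vowels_first_rightmost_py_main s
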